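-- pv_equiv track=rewrite | github.com/MichalMucek/IP-Subnet-Calculator | get_last_host_split.py | get_last_host_split_bin
-- ===== SOURCE A (Python) =====
-- def get_last_host_split_bin(network_split_bin, mask_cidr):
--     last_host_split_bin = network_split_bin
--     split_number = int(mask_cidr) // 8
--     in_split_pos = int(mask_cidr) % 8
--     replacing_split_part = ""
--
--     start_split = split_number
--
--     while start_split <= 3:
--         for i in range(0, 8):
--             if start_split == 3 and i == 7:
--                 replacing_split_part += '0'
--             else:
--                 if start_split == split_number:
--                     if i < in_split_pos:
--                         replacing_split_part += network_split_bin[start_split][i]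
--                     else:
--                         replacing_split_part += '1'
--                 else:
--                     replacing_split_part += '1'
--
--         last_host_split_bin[start_split] = replacing_split_part
--         replacing_split_part = ""
--         start_split += 1
--
--     return last_host_split_bin
-- ===== SOURCE B (Python) =====
-- def get_last_host_split_bin(network_split_bin, mask_cidr):
--     # Builds each affected octet as a whole string via slicing / repetition
--     # (mutates network_split_bin in place, like the original).
--     split_number = int(mask_cidr) // 8
--     in_split_pos = int(mask_cidr) % 8
--     for s in range(split_number, 4):
--         if s == split_number:
--             part = network_split_bin[s][:in_split_pos] + '1' * (8 - in_split_pos)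
--         else:
--             part = '1' * 8
--         if s == 3:
--             part = part[:7] + '0'
--         network_split_bin[s] = part
--     return network_split_bin
-- ===== Notes on version B (the rewrite author's own statement) =====
-- stated objective: simpler
-- what changed: Replaced the while-loop with a bit-by-bit inner loop over 8 positions by a single for-loop that builds each affected octet as a whole string via slicing and string repetition, fixing the final host bit afterwards.
import Mathlib
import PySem

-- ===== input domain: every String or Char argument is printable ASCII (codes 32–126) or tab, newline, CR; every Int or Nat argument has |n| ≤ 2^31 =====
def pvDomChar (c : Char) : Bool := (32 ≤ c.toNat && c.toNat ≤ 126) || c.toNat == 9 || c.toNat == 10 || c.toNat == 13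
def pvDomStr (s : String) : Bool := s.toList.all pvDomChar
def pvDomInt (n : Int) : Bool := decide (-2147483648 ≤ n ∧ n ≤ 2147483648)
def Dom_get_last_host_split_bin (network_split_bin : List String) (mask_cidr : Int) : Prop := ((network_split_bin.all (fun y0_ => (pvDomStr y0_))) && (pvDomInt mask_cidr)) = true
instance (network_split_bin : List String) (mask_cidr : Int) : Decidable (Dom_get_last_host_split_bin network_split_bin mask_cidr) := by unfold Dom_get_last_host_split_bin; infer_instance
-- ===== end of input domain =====

-- B builds each affected octet as a whole string by slicing/repetition instead of A's bit-by-bit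
-- inner loop (objective: simpler); both mutate the list in place in Python — equivalence is about the returned value.

-- ===== PORT A =====
-- one character network_split_bin[start_split][i]; total via getD, Pre_ excludes the raising inputs
def pvAChar (xs : List String) (s i : Int) : Char :=
  (PySem.Str.pyGet? ((PySem.List.pyGet? xs s).getD "") i).getD ' '

-- the inner 'for i in range(0, 8)' building replacing_split_part (as List Char)
def pvAInner (xs : List String) (split_number in_split_pos s : Int) : List Char :=
  (PySem.List.pyRange 0 8).foldl (fun acc i =>
    if s = 3 ∧ i = 7 then acc ++ ['0']
    else if s = split_number then
      (if i < in_split_pos then acc ++ [pvAChar xs s i] else acc ++ ['1'])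
    else acc ++ ['1']) []

-- the outer 'while start_split <= 3' loop; fuel = number of remaining iterations
def pvALoop : Nat → List String → Int → Int → Int → List String
  | 0, xs, _, _, _ => xs
  | n+1, xs, split_number, in_split_pos, s =>
      pvALoop n (PySem.List.pySetD xs s (String.ofList (pvAInner xs split_number in_split_pos s)))
        split_number in_split_pos (s+1)

def get_last_host_split_bin (network_split_bin : List String) (mask_cidr : Int) : List String :=
  let split_number := PySem.Int.floordiv mask_cidr 8
  let in_split_pos := PySem.Int.mod mask_cidr 8
  pvALoop (4 - split_number).toNat network_split_bin split_number in_split_pos split_number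

-- ===== PORT B =====
-- one whole octet, built by slicing and repetition (as List Char)
def pvBPart (xs : List String) (split_number in_split_pos s : Int) : List Char :=
  let part :=
    if s = split_number then
      PySem.List.slice ((PySem.List.pyGet? xs s).getD "").toList none (some in_split_pos)
        ++ List.replicate (8 - in_split_pos).toNat '1'
    else List.replicate 8 '1'
  if s = 3 then PySem.List.slice part none (some 7) ++ ['0'] else part

def get_last_host_split_bin_alt (network_split_bin : List String) (mask_cidr : Int) : List String :=
  let split_number := PySem.Int.floordiv mask_cidr 8
  let in_split_pos := PySem.Int.mod mask_cidr 8
  (PySem.List.pyRange split_number 4).foldl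
    (fun acc s => PySem.List.pySetD acc s (String.ofList (pvBPart acc split_number in_split_pos s)))
    network_split_bin

-- ===== PRECONDITION & SPEC =====
-- Pre_ is exactly where Python A returns: either the loop never runs (split_number ≥ 4), or the list
-- has the four assignable octets (length ≥ 4, -len ≤ split_number for the wrapped first index) and the
-- first rewritten octet is long enough for the in_split_pos character reads; otherwise A raises IndexError.
def Pre_get_last_host_split_bin (network_split_bin : List String) (mask_cidr : Int) : Prop :=
  4 ≤ PySem.Int.floordiv mask_cidr 8 ∨
    (4 ≤ network_split_bin.length ∧
     -(network_split_bin.length : Int) ≤ PySem.Int.floordiv mask_cidr 8 ∧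
     PySem.Int.mod mask_cidr 8 ≤
       (((PySem.List.pyGet? network_split_bin (PySem.Int.floordiv mask_cidr 8)).getD "").toList.length : Int))
instance (network_split_bin : List String) (mask_cidr : Int) : Decidable (Pre_get_last_host_split_bin network_split_bin mask_cidr) := by unfold Pre_get_last_host_split_bin; infer_instance

def pvWitness_get_last_host_split_bin : List String × Int :=
  (["11000000", "10101000", "00000001", "00000000"], 24)

def Spec_get_last_host_split_bin (network_split_bin : List String) (mask_cidr : Int) (out : List String) : Prop := out = get_last_host_split_bin_alt network_split_bin mask_cidr
instance (network_split_bin : List String) (mask_cidr : Int) (out : List String) : Decidable (Spec_get_last_host_split_bin network_split_bin mask_cidr out) := by unfold Spec_get_last_host_split_bin; infer_instance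

-- ===== CLAIM (what is proved, stated in full; the proofs are below) =====
def Claim_equal_get_last_host_split_bin : Prop := ∀ (network_split_bin : List String) (mask_cidr : Int), Dom_get_last_host_split_bin network_split_bin mask_cidr → Pre_get_last_host_split_bin network_split_bin mask_cidr → Spec_get_last_host_split_bin network_split_bin mask_cidr (get_last_host_split_bin network_split_bin mask_cidr)

-- ===== LEMMAS AND PROOFS =====

-- A's inner loop, written as a map over the 8 bit positions
theorem pvAInner_eq_map (xs : List String) (sn p s : Int) :
    pvAInner xs sn p s =
      (List.range 8).map (fun i : Nat =>
        if s = 3 ∧ (i : Int) = 7 then '0'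
        else if s = sn then (if (i : Int) < p then pvAChar xs s (i : Int) else '1') else '1') := by
  unfold pvAInner
  rw [show (8 : Int) = ((8 : Nat) : Int) by norm_num, PySem.List.pyRange_zero_nat,
    List.foldl_map]
  have := PySem.List.foldl_append_singleton_eq_map
    (f := fun i : Nat =>
      if s = 3 ∧ (i : Int) = 7 then '0'
      else if s = sn then (if (i : Int) < p then pvAChar xs s (i : Int) else '1') else '1')
    (l := List.range 8) (acc := [])
  rw [show (fun (x : List Char) (y : Nat) =>
        if s = 3 ∧ (y : Int) = 7 then x ++ ['0']
        else if s = sn then if (y : Int) < p then x ++ [pvAChar xs s (y : Int)] else x ++ ['1'] else x ++ ['1'])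
      = (fun (acc : List Char) (y : Nat) =>
        acc ++ [if s = 3 ∧ (y : Int) = 7 then '0'
          else if s = sn then (if (y : Int) < p then pvAChar xs s (y : Int) else '1') else '1']) from by
    funext acc y; split_ifs <;> rfl]
  rw [this]
  simp

-- take + replicate is the same 8-character map, when p characters are available
theorem take_rep_eq_map (cs : List Char) (xs : List String) (s : Int) (q : Nat)
    (hq : q ≤ 8) (hl : q ≤ cs.length)
    (hcs : cs = ((PySem.List.pyGet? xs s).getD "").toList) :
    cs.take q ++ List.replicate (8 - q) '1' =
      (List.range 8).map (fun i : Nat => if (i : Int) < (q : Int) then pvAChar xs s (i : Int) else '1') := by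
  apply List.ext_getElem
  · simp; omega
  · intro i h1 h2
    simp only [List.getElem_map, List.getElem_range]
    have h8 : i < 8 := by simpa using h2
    by_cases hip : i < q
    · rw [List.getElem_append_left (by simp; omega)]
      have : ((i : Int) < (q : Int)) := by exact_mod_cast hip
      simp only [this, if_pos, List.getElem_take]
      unfold pvAChar
      simp only [PySem.Str.pyGet?]
      rw [show ((PySem.List.pyGet? xs s).getD "").toList = cs from hcs.symm]
      simp [List.getElem?_eq_getElem (by omega : i < cs.length)]
    · rw [List.getElem_append_right (by simp; omega)]
      have : ¬ ((i : Int) < (q : Int)) := by omega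
      simp [this]

-- the two octet builders agree at the first rewritten position s = sn (needs enough characters)
theorem part_eq_first (xs : List String) (sn p : Int) (h0 : 0 ≤ p) (h8 : p < 8)
    (hl : p ≤ (((PySem.List.pyGet? xs sn).getD "").toList.length : Int)) :
    pvBPart xs sn p sn = pvAInner xs sn p sn := by
  set cs := ((PySem.List.pyGet? xs sn).getD "").toList with hcs
  have hq8 : p.toNat ≤ 8 := by omega
  have hql : p.toNat ≤ cs.length := by omega
  have hp : (p.toNat : Int) = p := Int.toNat_of_nonneg h0
  have hmap := take_rep_eq_map cs xs sn p.toNat hq8 hql hcs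
  rw [hp] at hmap
  rw [pvAInner_eq_map]
  unfold pvBPart
  rw [if_pos rfl, PySem.List.slice_to cs h0,
    show ((8 : Int) - p).toNat = 8 - p.toNat from by omega, hmap]
  by_cases h3 : sn = 3
  · subst h3
    rw [if_pos rfl, PySem.List.slice_to _ (by norm_num),
      show ((7 : Int)).toNat = 7 from rfl, ← List.map_take, List.take_range,
      show min 7 8 = 7 from rfl]
    apply List.ext_getElem
    · simp
    · intro i h1 h2
      simp only [List.length_append, List.length_map, List.length_range,
        List.length_cons, List.length_nil] at h1
      by_cases hi7 : i < 7
      · rw [List.getElem_append_left (by simp; omega)]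
        simp only [List.getElem_map, List.getElem_range]
        have hno : ¬ ((i : Int) = 7) := by omega
        simp [hno]
      · have hi : i = 7 := by omega
        subst hi
        rw [List.getElem_append_right (by simp)]
        simp
  · rw [if_neg h3]
    apply List.map_congr_left
    intro i hi
    have hno : ¬ (sn = 3 ∧ (i : Int) = 7) := by rintro ⟨h, _⟩; exact h3 h
    simp [hno]

-- the two octet builders agree at every later position s ≠ sn
theorem part_eq_later (xs : List String) (sn p s : Int) (hs : s ≠ sn) :
    pvBPart xs sn p s = pvAInner xs sn p s := by
  rw [pvAInner_eq_map]
  unfold pvBPart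
  rw [if_neg hs]
  by_cases h3 : s = 3
  · subst h3
    rw [if_pos rfl, PySem.List.slice_to _ (by norm_num),
      show ((7 : Int)).toNat = 7 from rfl, List.take_replicate,
      show min 7 8 = 7 from rfl]
    apply List.ext_getElem
    · simp
    · intro i h1 h2
      simp only [List.length_append, List.length_replicate,
        List.length_cons, List.length_nil] at h1
      by_cases hi7 : i < 7
      · rw [List.getElem_append_left (by simp; omega)]
        rw [List.getElem_replicate]
        simp only [List.getElem_map, List.getElem_range]
        have hno : ¬ ((i : Int) = 7) := by omega
        simp [hno, hs]
      · have hi : i = 7 := by omega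
        subst hi
        rw [List.getElem_append_right (by simp)]
        simp
  · rw [if_neg h3]
    apply List.ext_getElem
    · simp
    · intro i h1 h2
      rw [List.getElem_replicate, List.getElem_map, List.getElem_range]
      have hno : ¬ (s = 3 ∧ (i : Int) = 7) := by rintro ⟨h, _⟩; exact h3 h
      simp [hno, hs]

-- A's remaining iterations (all with s > sn) equal B's fold over the remaining range
theorem tail_eq (n : Nat) (sn p : Int) : ∀ (ys : List String) (s : Int), sn < s →
    pvALoop n ys sn p s =
      (PySem.List.pyRange s (s + n)).foldl
        (fun acc t => PySem.List.pySetD acc t (String.ofList (pvBPart acc sn p t))) ys := by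
  induction n with
  | zero => intro ys s _; rw [PySem.List.pyRange_one_eq_nil (by omega : s + ((0:Nat):Int) ≤ s)]; rfl
  | succ n ih =>
    intro ys s hs
    rw [PySem.List.pyRange_one_cons (by push_cast; omega : s < s + ((n+1 : Nat) : Int))]
    simp only [pvALoop, List.foldl_cons]
    rw [part_eq_later ys sn p s (by omega)]
    rw [ih _ (s+1) (by omega)]
    congr 1
    push_cast
    ring_nf

-- ===== VERDICT (by name: the statement is the Claim_ definition above) =====
theorem get_last_host_split_bin_spec : Claim_equal_get_last_host_split_bin := by
  intro xs cidr _ hpre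
  unfold Spec_get_last_host_split_bin get_last_host_split_bin get_last_host_split_bin_alt
  dsimp only
  set sn := PySem.Int.floordiv cidr 8 with hsn
  set p := PySem.Int.mod cidr 8 with hp
  by_cases h4 : 4 ≤ sn
  · rw [PySem.List.pyRange_one_eq_nil (by omega), List.foldl_nil]
    have : (4 - sn).toNat = 0 := by omega
    rw [this]; rfl
  · rcases hpre with h | ⟨hlen, hneg, hstr⟩
    · exact absurd h h4
    have h0p : 0 ≤ p := PySem.Int.mod_nonneg cidr (by norm_num)
    have h8p : p < 8 := PySem.Int.mod_lt cidr (by norm_num)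
    have hfuel : (4 - sn).toNat = ((3 - sn).toNat + 1) := by omega
    rw [hfuel]
    simp only [pvALoop]
    rw [PySem.List.pyRange_one_cons (by omega : sn < 4), List.foldl_cons]
    rw [part_eq_first xs sn p h0p h8p hstr]
    rw [tail_eq _ sn p _ (sn+1) (by omega)]
    have h44 : (sn + 1) + (((3 - sn).toNat : Nat) : Int) = 4 := by omega
    rw [h44]
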